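-- pv_equiv track=rewrite | github.com/JamesRMathis/ISEF-Project | funcGenerator.py | generate_break_statement
-- ===== SOURCE A (Python) =====
-- def generate_break_statement(function_code):
--     # indentation = "    " * (indentation_level + 1)
--     # return f"{indentation}break"
--     # Split the function code into lines
--     lines = function_code.splitlines()
--
--     last_loop_indentation = 0
--     # Iterate over the lines in reverse order to find the last for or while loop
--     for i in range(len(lines) - 1, -1, -1):
--         line = lines[i]
--         if 'for' in line or 'while' in line:
--             # Return the indentation level of the last loop
--             last_loop_indentation = (len(line) - len(line.lstrip())) // 4
--
--     # Return None if no loops were found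
--     if last_loop_indentation == 0:
--         return None
--
--     indentation = "    " * (last_loop_indentation + 1)
--     return f"{indentation}break"
-- ===== SOURCE B (Python) =====
-- def generate_break_statement(function_code):
--     # Forward scan with early exit: the value A ends with is the indentation of
--     # the FIRST line (from the top) containing 'for' or 'while', since A's
--     # reverse loop overwrites on every match.
--     for line in function_code.splitlines():
--         if 'for' in line or 'while' in line:
--             level = (len(line) - len(line.lstrip())) // 4
--             if level == 0:
--                 return None
--             return "    " * (level + 1) + "break"
--     return None
-- ===== Notes on version B (the rewrite author's own statement) =====
-- stated objective: simpler
-- what changed: Replaces the reverse full scan that keeps overwriting an accumulator with a forward scan that returns at the first line containing 'for' or 'while' (the overwriting makes A's result depend only on that first line).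
import Mathlib
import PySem

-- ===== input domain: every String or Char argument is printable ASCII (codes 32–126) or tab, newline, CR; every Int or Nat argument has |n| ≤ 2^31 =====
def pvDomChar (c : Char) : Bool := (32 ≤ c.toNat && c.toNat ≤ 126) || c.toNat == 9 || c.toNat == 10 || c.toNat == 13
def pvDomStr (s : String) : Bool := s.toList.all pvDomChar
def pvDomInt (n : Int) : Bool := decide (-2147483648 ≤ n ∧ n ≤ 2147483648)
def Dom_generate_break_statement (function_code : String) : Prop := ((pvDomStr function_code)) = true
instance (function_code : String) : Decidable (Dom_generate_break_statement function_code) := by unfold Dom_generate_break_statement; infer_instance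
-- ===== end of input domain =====

-- B replaces A's reverse scan that keeps overwriting an accumulator by a forward scan
-- returning at the first matching line (objective: simpler).

-- ===== PORT A =====
-- A's reverse index loop with an overwritten accumulator; the f-string build
-- "    " * (n + 1) + "break" is ported by hand on List Char (exact: string
-- repetition = flatten of replicate, concatenation = List append).
def generate_break_statement (function_code : String) : Option String :=
  let lines := PySem.Str.splitlines function_code
  let last_loop_indentation : Int :=
    (PySem.List.pyRange ((lines.length : Int) - 1) (-1) (-1)).foldl
      (fun last_loop_indentation i =>
        let line := PySem.List.pyGetD lines i ""
        if PySem.Str.isIn "for" line || PySem.Str.isIn "while" line then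
          PySem.Int.floordiv
            ((PySem.Str.len line : Int) - (PySem.Str.len (PySem.Str.lstrip line) : Int)) 4
        else last_loop_indentation) 0
  if last_loop_indentation = 0 then none
  else
    let indentation : List Char := (List.replicate (last_loop_indentation + 1).toNat "    ".toList).flatten
    some (String.ofList (indentation ++ "break".toList))

-- ===== PORT B =====
-- forward scan, early exit at the first line containing 'for' or 'while'
def pvFirstLoopBreak : List String → Option String
  | [] => none
  | line :: rest =>
    if PySem.Str.isIn "for" line || PySem.Str.isIn "while" line then
      let level : Int :=
        PySem.Int.floordiv
          ((PySem.Str.len line : Int) - (PySem.Str.len (PySem.Str.lstrip line) : Int)) 4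
      if level = 0 then none
      else some (String.ofList ((List.replicate (level + 1).toNat "    ".toList).flatten ++ "break".toList))
    else pvFirstLoopBreak rest

def generate_break_statement_alt (function_code : String) : Option String :=
  pvFirstLoopBreak (PySem.Str.splitlines function_code)

-- ===== PRECONDITION & SPEC =====
def Spec_generate_break_statement (function_code : String) (out : Option String) : Prop := out = generate_break_statement_alt function_code
instance (function_code : String) (out : Option String) : Decidable (Spec_generate_break_statement function_code out) := by unfold Spec_generate_break_statement; infer_instance

-- ===== CLAIM (what is proved, stated in full; the proofs are below) =====
def Claim_equal_generate_break_statement : Prop := ∀ (function_code : String), Dom_generate_break_statement function_code → Spec_generate_break_statement function_code (generate_break_statement function_code)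

-- ===== LEMMAS AND PROOFS =====

-- A's reverse range is the reversed list of valid indices
theorem pv_pyRange_rev (n : Nat) :
    PySem.List.pyRange ((n : Int) - 1) (-1) (-1) = ((List.range n).map (fun (k : Nat) => (k : Int))).reverse := by
  unfold PySem.List.pyRange
  simp only [if_neg (by decide : ¬ ((-1 : Int) = 0))]
  rcases Nat.eq_zero_or_pos n with h | h
  · subst h; norm_num
  · have hlt : (-1 : Int) < (n : Int) - 1 := by omega
    simp only [if_neg (by decide : ¬ (0 : Int) < -1), if_pos hlt]
    have hcount : ((((n : Int) - 1) - (-1) + -(-1) - 1) / -(-1)).toNat = n := by norm_num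
    rw [hcount, ← List.map_reverse, List.range_eq_range', List.reverse_range', List.map_map,
        ← List.range_eq_range']
    apply List.map_congr_left
    intro k hk
    have hk' : k < n := List.mem_range.mp hk
    simp only [Function.comp]
    omega

-- the index-based foldr over range = foldr over the lines themselves
theorem pv_foldr_range_getD (g : Int → String → Int) :
    ∀ (lines : List String) (s : Int),
      (List.range lines.length).foldr (fun (k : Nat) s => g s (PySem.List.pyGetD lines (k : Int) "")) s
        = lines.foldr (fun line s => g s line) s := by
  intro lines
  induction lines with
  | nil => intro s; simp
  | cons x rest ih =>
    intro s
    simp only [List.length_cons, List.range_succ_eq_map, List.foldr_cons, List.foldr_map,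
      PySem.List.pyGetD_natCast, List.getD_cons_zero, List.getD_cons_succ]
    simp only [PySem.List.pyGetD_natCast] at ih
    rw [ih]

-- A's whole loop computes the level of the FIRST matching line (or keeps 0)
theorem pv_loopA_eq_foldr (lines : List String) :
    (PySem.List.pyRange ((lines.length : Int) - 1) (-1) (-1)).foldl
      (fun s i =>
        let line := PySem.List.pyGetD lines i ""
        if PySem.Str.isIn "for" line || PySem.Str.isIn "while" line then
          PySem.Int.floordiv
            ((PySem.Str.len line : Int) - (PySem.Str.len (PySem.Str.lstrip line) : Int)) 4
        else s) 0
    = lines.foldr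
        (fun line s =>
          if PySem.Str.isIn "for" line || PySem.Str.isIn "while" line then
            PySem.Int.floordiv
              ((PySem.Str.len line : Int) - (PySem.Str.len (PySem.Str.lstrip line) : Int)) 4
          else s) 0 := by
  rw [pv_pyRange_rev lines.length, List.foldl_reverse, List.foldr_map]
  exact pv_foldr_range_getD
    (fun s line =>
      if PySem.Str.isIn "for" line || PySem.Str.isIn "while" line then
        PySem.Int.floordiv
          ((PySem.Str.len line : Int) - (PySem.Str.len (PySem.Str.lstrip line) : Int)) 4
      else s) lines 0

-- B's early-exit scan agrees with rendering the result of that foldr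
theorem pv_firstLoopBreak_eq (lines : List String) :
    pvFirstLoopBreak lines
      = (let r := lines.foldr
            (fun line s =>
              if PySem.Str.isIn "for" line || PySem.Str.isIn "while" line then
                PySem.Int.floordiv
                  ((PySem.Str.len line : Int) - (PySem.Str.len (PySem.Str.lstrip line) : Int)) 4
              else s) 0
         if r = 0 then none
         else some (String.ofList ((List.replicate (r + 1).toNat "    ".toList).flatten ++ "break".toList))) := by
  induction lines with
  | nil => simp [pvFirstLoopBreak]
  | cons line rest ih =>
    by_cases h : (PySem.Str.isIn "for" line || PySem.Str.isIn "while" line) = true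
    · simp only [pvFirstLoopBreak, List.foldr_cons, h, if_true]
    · simp only [pvFirstLoopBreak, List.foldr_cons, h, if_false, Bool.false_eq_true]
      exact ih

-- ===== VERDICT (by name: the statement is the Claim_ definition above) =====
theorem generate_break_statement_spec : Claim_equal_generate_break_statement := by
  intro function_code _
  unfold Spec_generate_break_statement generate_break_statement generate_break_statement_alt
  simp only [pv_loopA_eq_foldr, pv_firstLoopBreak_eq]
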